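-- pv_equiv track=rewrite | github.com/gadisamenu/competitive-programming | 0835-image-overlap/0835-image-overlap.py | count_match
-- ===== SOURCE A (Python) =====
-- def count_match(img1,img2,rof,cof):
--     start_r,end_r = (rof,len(img1)) if rof > 0 else (0,len(img1)+rof)
--     start_c,end_c = (cof,len(img1)) if cof > 0 else (0,len(img1)+cof)
--
--
--     count =0
--     for row in range(start_r,end_r):
--         for col in range(start_c,end_c):
--             if img1[row-rof][col-cof] and img2[row][col]:
--                 count += 1
--     return count
-- ===== SOURCE B (Python) =====
-- def count_match(img1, img2, rof, cof):
--     ones1 = {(r, c) for r, row in enumerate(img1) for c, v in enumerate(row) if v}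
--     ones2 = {(r, c) for r, row in enumerate(img2) for c, v in enumerate(row) if v}
--     return sum(1 for r, c in ones1 if (r + rof, c + cof) in ones2)
-- ===== Notes on version B (the rewrite author's own statement) =====
-- stated objective: idiomatic
-- what changed: Replaces the clipped rectangular index scan with building coordinate sets of set-cells of both images and counting img1 cells whose shifted coordinate is a member of img2's set (membership enforces the bounds).
-- outside the precondition, e.g. on count_match([[1, 1]], [[1, 1]], 0, 0): A returns 1, B returns 2
import Mathlib
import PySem

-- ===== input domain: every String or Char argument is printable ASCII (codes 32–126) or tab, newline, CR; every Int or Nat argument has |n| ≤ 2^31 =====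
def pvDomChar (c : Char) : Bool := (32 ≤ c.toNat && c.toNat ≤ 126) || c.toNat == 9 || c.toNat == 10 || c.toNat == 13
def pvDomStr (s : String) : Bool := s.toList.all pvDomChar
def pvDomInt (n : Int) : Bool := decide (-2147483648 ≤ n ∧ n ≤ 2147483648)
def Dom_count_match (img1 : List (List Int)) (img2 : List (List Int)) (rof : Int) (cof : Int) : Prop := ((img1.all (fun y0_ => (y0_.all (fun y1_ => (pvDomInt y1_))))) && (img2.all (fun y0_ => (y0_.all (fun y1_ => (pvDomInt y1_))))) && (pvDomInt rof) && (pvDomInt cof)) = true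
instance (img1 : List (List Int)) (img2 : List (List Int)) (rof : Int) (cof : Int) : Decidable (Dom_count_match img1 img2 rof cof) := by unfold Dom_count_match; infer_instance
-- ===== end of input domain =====

-- B replaces A's clipped rectangular index scan by coordinate sets of the set-cells of both
-- images and a sparse membership count (objective: idiomatic; equal on square same-shape grids).

-- ===== PORT A =====
-- pyGetD is exact here: under Pre_count_match every index the loops reach is in range.
def count_match (img1 : List (List Int)) (img2 : List (List Int)) (rof : Int) (cof : Int) : Int :=
  let start_r : Int := if rof > 0 then rof else 0
  let end_r : Int := if rof > 0 then (img1.length : Int) else (img1.length : Int) + rof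
  let start_c : Int := if cof > 0 then cof else 0
  let end_c : Int := if cof > 0 then (img1.length : Int) else (img1.length : Int) + cof
  (PySem.List.pyRange start_r end_r 1).foldl (fun count row =>
    (PySem.List.pyRange start_c end_c 1).foldl (fun count col =>
      if PySem.List.pyGetD (PySem.List.pyGetD img1 (row - rof) []) (col - cof) 0 ≠ 0 ∧
         PySem.List.pyGetD (PySem.List.pyGetD img2 row []) col 0 ≠ 0
      then count + 1 else count) count) 0

-- ===== PORT B =====
-- {(r, c) for r, row in enumerate(img) for c, v in enumerate(row) if v}
def pvOnes (img : List (List Int)) : PySem.Set (Int × Int) :=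
  PySem.Set.ofList ((PySem.List.enumerate img 0).flatMap (fun rrow =>
    (PySem.List.enumerate rrow.2 0).filterMap (fun cv =>
      if cv.2 ≠ 0 then some (rrow.1, cv.1) else none)))

-- sum(1 for r, c in ones1 if (r + rof, c + cof) in ones2)
def count_match_alt (img1 : List (List Int)) (img2 : List (List Int)) (rof : Int) (cof : Int) : Int :=
  let ones1 := pvOnes img1
  let ones2 := pvOnes img2
  ones1.foldl (fun acc p =>
    if PySem.Set.contains ones2 (p.1 + rof, p.2 + cof) then acc + 1 else acc) 0

-- ===== PRECONDITION & SPEC =====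
-- widest row length of an image (used only to state Pre_)
def pvW (img : List (List Int)) : Nat := img.foldr (fun row acc => max row.length acc) 0

-- Pre_ admits (a) square same-shape grids — A's loop bounds all come from len(img1), so only
-- there does its scan visit exactly the overlap — and (b) any input whose offset empties A's
-- loop ranges and pushes every shifted img1 cell outside img2, where both programs return 0.
-- It excludes non-square grids with small offsets, on which A raises IndexError on a short row
-- or returns a count clipped to len(img1) rows/columns that B's coordinate sets do not reproduce.
def Pre_count_match (img1 : List (List Int)) (img2 : List (List Int)) (rof : Int) (cof : Int) : Prop :=
  (img2.length = img1.length ∧ (∀ row ∈ img1, row.length = img1.length) ∧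
    (∀ row ∈ img2, row.length = img1.length))
  ∨ ((img1.length : Int) ≤ rof ∧ (img2.length : Int) ≤ rof)
  ∨ rof ≤ -(img1.length : Int)
  ∨ ((img1.length : Int) ≤ cof ∧ (pvW img2 : Int) ≤ cof)
  ∨ (cof ≤ -(img1.length : Int) ∧ cof ≤ -(pvW img1 : Int))
instance (img1 : List (List Int)) (img2 : List (List Int)) (rof : Int) (cof : Int) : Decidable (Pre_count_match img1 img2 rof cof) := by unfold Pre_count_match; infer_instance

def pvWitness_count_match : List (List Int) × List (List Int) × Int × Int :=
  ([[1, 0], [0, 1]], [[0, 1], [1, 0]], 1, 1)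

def Spec_count_match (img1 : List (List Int)) (img2 : List (List Int)) (rof : Int) (cof : Int) (out : Int) : Prop := out = count_match_alt img1 img2 rof cof
instance (img1 : List (List Int)) (img2 : List (List Int)) (rof : Int) (cof : Int) (out : Int) : Decidable (Spec_count_match img1 img2 rof cof out) := by unfold Spec_count_match; infer_instance

-- ===== CLAIM (what is proved, stated in full; the proofs are below) =====
def Claim_equal_count_match : Prop := ∀ (img1 : List (List Int)) (img2 : List (List Int)) (rof : Int) (cof : Int), Dom_count_match img1 img2 rof cof → Pre_count_match img1 img2 rof cof → Spec_count_match img1 img2 rof cof (count_match img1 img2 rof cof)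

-- ===== LEMMAS AND PROOFS =====

-- the cell accessor both ports share
def pvCell (img : List (List Int)) (r c : Int) : Int :=
  PySem.List.pyGetD (PySem.List.pyGetD img r []) c 0

-- one row's block of B's comprehension, with a general enumerate start
lemma pv_mem_blk (ri : Int) (row : List Int) (s : Int) (p : Int × Int) :
    p ∈ (PySem.List.enumerate row s).filterMap
        (fun cv => if cv.2 ≠ 0 then some (ri, cv.1) else none)
      ↔ p.1 = ri ∧ ∃ k : Nat, k < row.length ∧ p.2 = s + k ∧ row.getD k 0 ≠ 0 := by
  induction row generalizing s with
  | nil => simp [PySem.List.enumerate_nil]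
  | cons x xs ih =>
    rw [PySem.List.enumerate_cons, List.filterMap_cons]
    rcases p with ⟨p1, p2⟩
    by_cases hx : x ≠ 0
    · simp only [if_pos hx, List.mem_cons, ih]
      constructor
      · rintro (h | ⟨h1, k, hk, h2, h3⟩)
        · obtain ⟨rfl, rfl⟩ : p1 = ri ∧ p2 = s := by
            simpa [Prod.ext_iff] using h
          exact ⟨rfl, 0, by simp, by simp, by simpa using hx⟩
        · refine ⟨h1, k + 1, by simpa using hk, ?_, by simpa using h3⟩
          push_cast; omega
      · rintro ⟨h1, k, hk, h2, h3⟩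
        cases k with
        | zero =>
          left
          simp only [List.getD_cons_zero] at h3
          simp only [Nat.cast_zero, add_zero] at h2
          simp [h1, h2]
        | succ k =>
          right
          refine ⟨h1, k, by simpa using hk, ?_, by simpa using h3⟩
          push_cast at h2 ⊢; omega
    · simp only [if_neg hx]
      rw [not_not] at hx
      rw [ih]
      constructor
      · rintro ⟨h1, k, hk, h2, h3⟩
        refine ⟨h1, k + 1, by simpa using hk, ?_, by simpa using h3⟩
        push_cast; omega
      · rintro ⟨h1, k, hk, h2, h3⟩
        cases k with
        | zero => simp [hx] at h3
        | succ k =>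
          refine ⟨h1, k, by simpa using hk, ?_, by simpa using h3⟩
          push_cast at h2 ⊢; omega

-- the whole comprehension, with a general enumerate start
lemma pv_mem_onesList (img : List (List Int)) (s : Int) (p : Int × Int) :
    p ∈ (PySem.List.enumerate img s).flatMap (fun rrow =>
        (PySem.List.enumerate rrow.2 0).filterMap (fun cv =>
          if cv.2 ≠ 0 then some (rrow.1, cv.1) else none))
      ↔ ∃ r : Nat, r < img.length ∧ p.1 = s + r ∧
          ∃ k : Nat, k < (img.getD r []).length ∧ p.2 = (k : Int) ∧ (img.getD r []).getD k 0 ≠ 0 := by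
  induction img generalizing s with
  | nil => simp [PySem.List.enumerate_nil]
  | cons row rest ih =>
    rw [PySem.List.enumerate_cons, List.flatMap_cons, List.mem_append, pv_mem_blk, ih]
    constructor
    · rintro (⟨h1, k, hk, h2, h3⟩ | ⟨r, hr, h1, k, hk, h2, h3⟩)
      · exact ⟨0, by simp, by simpa using h1, k, by simpa using hk, by simpa using h2,
          by simpa using h3⟩
      · refine ⟨r + 1, by simpa using hr, ?_, k, by simpa using hk, h2, by simpa using h3⟩
        push_cast at h1 ⊢; omega
    · rintro ⟨r, hr, h1, k, hk, h2, h3⟩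
      cases r with
      | zero =>
        left
        exact ⟨by simpa using h1, k, by simpa using hk, by simpa using h2, by simpa using h3⟩
      | succ r =>
        right
        refine ⟨r, by simpa using hr, ?_, k, by simpa using hk, h2, by simpa using h3⟩
        push_cast at h1 ⊢; omega

-- membership in the coordinate set of a uniform-width image
lemma pv_mem_pvOnes {img : List (List Int)} {m : Nat}
    (h : ∀ row ∈ img, row.length = m) (p : Int × Int) :
    p ∈ pvOnes img ↔
      0 ≤ p.1 ∧ p.1 < (img.length : Int) ∧ 0 ≤ p.2 ∧ p.2 < (m : Int) ∧ pvCell img p.1 p.2 ≠ 0 := by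
  rw [pvOnes, PySem.Set.mem_ofList, pv_mem_onesList]
  constructor
  · rintro ⟨r, hr, h1, k, hk, h2, h3⟩
    have hrow : (img.getD r []).length = m := h _ (by
      rw [List.getD_eq_getElem _ _ hr]; exact List.getElem_mem hr)
    refine ⟨by omega, by simp [h1]; omega, by omega,
      by rw [h2]; exact_mod_cast (by omega : k < m), ?_⟩
    rw [pvCell, h1, h2]
    simpa [PySem.List.pyGetD_natCast, zero_add] using h3
  · rintro ⟨h0, h1, h2, h3, h4⟩
    refine ⟨p.1.toNat, by omega, by omega, p.2.toNat, ?_, by omega, ?_⟩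
    · have hrow : (img.getD p.1.toNat []).length = m := h _ (by
        rw [List.getD_eq_getElem _ _ (by omega)]; exact List.getElem_mem (by omega))
      omega
    · rw [pvCell] at h4
      have e1 : p.1 = ((p.1.toNat : Nat) : Int) := by omega
      have e2 : p.2 = ((p.2.toNat : Nat) : Int) := by omega
      rw [e1, e2, PySem.List.pyGetD_natCast, PySem.List.pyGetD_natCast] at h4
      exact h4

lemma pv_toFinset_pyRange (a b : Int) :
    (PySem.List.pyRange a b 1).toFinset = Finset.Ico a b := by
  ext x; simp [PySem.List.mem_pyRange_one, Finset.mem_Ico]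

lemma pv_countP_Ico (q : Int → Prop) [DecidablePred q] (a b : Int) :
    List.countP (fun x => decide (q x)) (PySem.List.pyRange a b 1)
      = ((Finset.Ico a b).filter q).card := by
  rw [List.countP_eq_length_filter,
    ← List.toFinset_card_of_nodup ((PySem.List.nodup_pyRange_one a b).filter _),
    List.toFinset_filter, pv_toFinset_pyRange]
  congr 1
  ext x
  simp

-- A's nested counting loops compute the size of a filtered product of Icos
lemma pv_A_core (q : Int × Int → Prop) [DecidablePred q] (sr er sc ec : Int) :
    (PySem.List.pyRange sr er 1).foldl (fun count row =>
      (PySem.List.pyRange sc ec 1).foldl (fun count col =>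
        if q (row, col) then count + 1 else count) count) 0
    = (((Finset.Ico sr er ×ˢ Finset.Ico sc ec).filter q).card : Int) := by
  simp only [PySem.List.foldl_ite_add_one, PySem.List.foldl_add]
  rw [← List.sum_toFinset _ (PySem.List.nodup_pyRange_one sr er), pv_toFinset_pyRange]
  rw [Finset.card_filter, Finset.sum_product]
  push_cast
  rw [zero_add]
  refine Finset.sum_congr rfl (fun row _ => ?_)
  rw [pv_countP_Ico (fun col => q (row, col)), Finset.card_filter]
  push_cast
  rfl

-- B's counting fold over a duplicate-free list is the size of a filtered toFinset
lemma pv_B_core (l : PySem.Set (Int × Int)) (hn : l.Nodup) (p : Int × Int → Bool) :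
    List.foldl (fun acc x => if p x then acc + 1 else acc) 0 l
    = ((l.toFinset.filter (fun x => p x = true)).card : Int) := by
  rw [PySem.List.foldl_if_add_one, zero_add, List.countP_eq_length_filter,
    ← List.toFinset_card_of_nodup (hn.filter _), List.toFinset_filter]


-- row length is bounded by the widest row
lemma pv_le_W (img : List (List Int)) : ∀ row ∈ img, row.length ≤ pvW img := by
  induction img with
  | nil => simp
  | cons r rest ih =>
    intro row h
    rcases List.mem_cons.mp h with rfl | h
    · simp [pvW]
    · have := ih row h
      simp only [pvW, List.foldr_cons] at *
      omega

-- coarse bounds on any member of a coordinate set (no shape hypothesis)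
lemma pv_bounds {img : List (List Int)} {p : Int × Int} (hp : p ∈ pvOnes img) :
    0 ≤ p.1 ∧ p.1 < (img.length : Int) ∧ 0 ≤ p.2 ∧ p.2 < (pvW img : Int) := by
  rw [pvOnes, PySem.Set.mem_ofList, pv_mem_onesList] at hp
  obtain ⟨r, hr, h1, k, hk, h2, h3⟩ := hp
  have hw : (img.getD r []).length ≤ pvW img := pv_le_W img _ (by
    rw [List.getD_eq_getElem _ _ hr]; exact List.getElem_mem hr)
  omega

-- on an input whose offset empties A's ranges and overshoots img2, both programs return 0
lemma pv_zero (img1 img2 : List (List Int)) (rof cof : Int)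
    (h : ((img1.length : Int) ≤ rof ∧ (img2.length : Int) ≤ rof)
      ∨ rof ≤ -(img1.length : Int)
      ∨ ((img1.length : Int) ≤ cof ∧ (pvW img2 : Int) ≤ cof)
      ∨ (cof ≤ -(img1.length : Int) ∧ cof ≤ -(pvW img1 : Int))) :
    count_match img1 img2 rof cof = count_match_alt img1 img2 rof cof := by
  have hA : count_match img1 img2 rof cof
      = (((Finset.Ico (if rof > 0 then rof else 0)
            (if rof > 0 then (img1.length : Int) else (img1.length : Int) + rof) ×ˢ
          Finset.Ico (if cof > 0 then cof else 0)
            (if cof > 0 then (img1.length : Int) else (img1.length : Int) + cof)).filter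
          (fun p => pvCell img1 (p.1 - rof) (p.2 - cof) ≠ 0 ∧ pvCell img2 p.1 p.2 ≠ 0)).card : Int) :=
    pv_A_core (fun p => pvCell img1 (p.1 - rof) (p.2 - cof) ≠ 0 ∧ pvCell img2 p.1 p.2 ≠ 0)
      (if rof > 0 then rof else 0)
      (if rof > 0 then (img1.length : Int) else (img1.length : Int) + rof)
      (if cof > 0 then cof else 0)
      (if cof > 0 then (img1.length : Int) else (img1.length : Int) + cof)
  have hB : count_match_alt img1 img2 rof cof
      = (((pvOnes img1).toFinset.filter
          (fun p => PySem.Set.contains (pvOnes img2) (p.1 + rof, p.2 + cof) = true)).card : Int) :=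
    pv_B_core _ (PySem.Set.nodup_ofList _) _
  have hBz : (((pvOnes img1).toFinset.filter
      (fun p => PySem.Set.contains (pvOnes img2) (p.1 + rof, p.2 + cof) = true)) : Finset (Int × Int)) = ∅ := by
    rw [Finset.filter_eq_empty_iff]
    intro p hp hc
    have b1 := pv_bounds (List.mem_toFinset.mp hp)
    rw [PySem.Set.contains_iff] at hc
    have b2 := pv_bounds hc
    simp only at b2
    rcases h with ⟨h1, h2⟩ | h1 | ⟨h1, h2⟩ | ⟨h1, h2⟩ <;> omega
  rw [hA, hB, hBz]
  have hAz : (Finset.Ico (if rof > 0 then rof else 0)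
        (if rof > 0 then (img1.length : Int) else (img1.length : Int) + rof) ×ˢ
      Finset.Ico (if cof > 0 then cof else 0)
        (if cof > 0 then (img1.length : Int) else (img1.length : Int) + cof)) = ∅ := by
    rcases h with ⟨h1, h2⟩ | h1 | ⟨h1, h2⟩ | ⟨h1, h2⟩
    · rw [Finset.Ico_eq_empty (by split_ifs <;> omega), Finset.empty_product]
    · rw [Finset.Ico_eq_empty (by split_ifs <;> omega), Finset.empty_product]
    · rw [Finset.Ico_eq_empty (a := if cof > 0 then cof else 0) (by split_ifs <;> omega),
        Finset.product_empty]
    · rw [Finset.Ico_eq_empty (a := if cof > 0 then cof else 0) (by split_ifs <;> omega),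
        Finset.product_empty]
  rw [hAz]
  simp

lemma pv_main (img1 img2 : List (List Int)) (rof cof : Int)
    (hlen2 : img2.length = img1.length)
    (hrow1 : ∀ row ∈ img1, row.length = img1.length)
    (hrow2 : ∀ row ∈ img2, row.length = img1.length) :
    count_match img1 img2 rof cof = count_match_alt img1 img2 rof cof := by
  have hA : count_match img1 img2 rof cof
      = (((Finset.Ico (if rof > 0 then rof else 0)
            (if rof > 0 then (img1.length : Int) else (img1.length : Int) + rof) ×ˢ
          Finset.Ico (if cof > 0 then cof else 0)
            (if cof > 0 then (img1.length : Int) else (img1.length : Int) + cof)).filter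
          (fun p => pvCell img1 (p.1 - rof) (p.2 - cof) ≠ 0 ∧ pvCell img2 p.1 p.2 ≠ 0)).card : Int) :=
    pv_A_core (fun p => pvCell img1 (p.1 - rof) (p.2 - cof) ≠ 0 ∧ pvCell img2 p.1 p.2 ≠ 0)
      (if rof > 0 then rof else 0)
      (if rof > 0 then (img1.length : Int) else (img1.length : Int) + rof)
      (if cof > 0 then cof else 0)
      (if cof > 0 then (img1.length : Int) else (img1.length : Int) + cof)
  have hB : count_match_alt img1 img2 rof cof
      = (((pvOnes img1).toFinset.filter
          (fun p => PySem.Set.contains (pvOnes img2) (p.1 + rof, p.2 + cof) = true)).card : Int) :=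
    pv_B_core _ (PySem.Set.nodup_ofList _) _
  have hl : ((img2.length : Int)) = img1.length := by exact_mod_cast hlen2
  rw [hA, hB]
  norm_cast
  refine Finset.card_nbij' (fun p => (p.1 - rof, p.2 - cof)) (fun p => (p.1 + rof, p.2 + cof))
    ?_ ?_ ?_ ?_
  · intro p hp
    simp only [Finset.coe_filter, Set.mem_setOf_eq, Finset.mem_product, Finset.mem_Ico] at hp
    obtain ⟨⟨⟨hr1, hr2⟩, hc1, hc2⟩, hcell1, hcell2⟩ := hp
    simp only [Finset.mem_coe, Finset.mem_filter, List.mem_toFinset, pv_mem_pvOnes hrow1,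
      PySem.Set.contains_iff, pv_mem_pvOnes hrow2, sub_add_cancel]
    refine ⟨⟨?_, ?_, ?_, ?_, hcell1⟩, ?_, ?_, ?_, ?_, hcell2⟩ <;>
      split_ifs at hr1 hr2 hc1 hc2 <;> omega
  · intro p hp
    simp only [Finset.mem_coe, Finset.mem_filter, List.mem_toFinset, pv_mem_pvOnes hrow1,
      PySem.Set.contains_iff, pv_mem_pvOnes hrow2] at hp
    obtain ⟨⟨h1, h2, h3, h4, hcell1⟩, g1, g2, g3, g4, hcell2⟩ := hp
    simp only [Finset.coe_filter, Set.mem_setOf_eq, Finset.mem_product, Finset.mem_Ico,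
      add_sub_cancel_right]
    refine ⟨⟨⟨?_, ?_⟩, ?_, ?_⟩, hcell1, hcell2⟩ <;> split_ifs <;> omega
  · intro p _; simp
  · intro p _; simp

-- ===== VERDICT (by name: the statement is the Claim_ definition above) =====
theorem count_match_spec : Claim_equal_count_match := by
  intro img1 img2 rof cof _ hpre
  rcases hpre with ⟨hlen2, hrow1, hrow2⟩ | h | h | h | h
  · exact pv_main img1 img2 rof cof hlen2 hrow1 hrow2
  · exact pv_zero img1 img2 rof cof (Or.inl h)
  · exact pv_zero img1 img2 rof cof (Or.inr (Or.inl h))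
  · exact pv_zero img1 img2 rof cof (Or.inr (Or.inr (Or.inl h)))
  · exact pv_zero img1 img2 rof cof (Or.inr (Or.inr (Or.inr h)))
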